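-- pv_equiv track=rewrite | github.com/tersver/codingstudy | programmers_stackqueue_problem2.py | solution
-- ===== SOURCE A (Python) =====
-- def solution(progresses, speeds):
-- 	answer = []
-- 	days=[]
-- 	for i in range(0,len(progresses)):
-- 		count=0
-- 		while progresses[i]<100:
-- 			count=count+1
-- 			progresses[i]=progresses[i]+speeds[i]
-- 		days.insert(i,count)
-- 	index=0
-- 	while len(days)>0:
-- 		count=1
-- 		day = days.pop(0)
-- 		if len(days)>0:
-- 			while day>=days[0]:
-- 				days.pop(0)
-- 				count=count+1
-- 				if len(days) == 0:
-- 					break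
-- 			answer.insert(index,count)
-- 			index=index+1
-- 		else:
-- 			answer.insert(index,1)
-- 	return answer
-- ===== SOURCE B (Python) =====
-- def solution(progresses, speeds):
--     n = len(progresses)
--     days = []
--     for i in range(n):
--         p = progresses[i]
--         if p >= 100:
--             d = 0
--         else:
--             d = -((p - 100) // speeds[i])   # ceil((100-p)/speeds[i])
--             progresses[i] = p + speeds[i] * d   # same in-place mutation as A
--         days.append(d)
--     answer = []
--     i = 0
--     while i < n:
--         t = days[i]
--         j = i + 1
--         while j < n and days[j] <= t:
--             j += 1
--         answer.append(j - i)
--         i = j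
--     return answer
-- ===== Notes on version B (the rewrite author's own statement) =====
-- stated objective: simpler
-- what changed: Each task's day count is computed by a closed-form ceiling division instead of A's step-by-step counting while-loop, and the grouping walks the days array with two indices instead of repeatedly popping from the front of a list.
import Mathlib
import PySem

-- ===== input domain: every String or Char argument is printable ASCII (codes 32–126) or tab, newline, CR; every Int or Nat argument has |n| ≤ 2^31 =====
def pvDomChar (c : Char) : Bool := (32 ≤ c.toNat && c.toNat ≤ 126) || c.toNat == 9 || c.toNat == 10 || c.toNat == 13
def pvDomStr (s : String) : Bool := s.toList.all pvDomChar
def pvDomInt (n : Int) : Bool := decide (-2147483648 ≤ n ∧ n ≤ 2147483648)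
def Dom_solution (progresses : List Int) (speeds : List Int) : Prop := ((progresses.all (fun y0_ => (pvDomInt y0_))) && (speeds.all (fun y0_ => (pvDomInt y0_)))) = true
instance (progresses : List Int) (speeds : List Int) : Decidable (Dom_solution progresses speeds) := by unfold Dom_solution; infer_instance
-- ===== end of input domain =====

-- B computes each task's day count by a closed-form ceiling division instead of A's counting
-- while-loop, and groups with two indices instead of popping from the front.
-- Both Pythons mutate progresses[i] in place identically; the equivalence proved here is about
-- the RETURN value (the Lean ports return only the answer list).

-- ===== PORT A =====
-- inner 'while progresses[i] < 100' loop: counts steps of += speeds[i] until ≥ 100.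
-- In Python this loop DIVERGES when speeds[i] ≤ 0 (and progress < 100); the '0 < s' test below is
-- only a totality guard — those inputs are excluded by Pre_solution.
def simCount (count p s : Int) : Int :=
  if _h : p < 100 then
    if _hs : 0 < s then simCount (count + 1) (p + s) s else count
  else count
termination_by (100 - p).toNat
decreasing_by omega

-- A's inner pop-while: pops leading days ≤ day, returning how many were popped and the rest
def popWhile (day : Int) : List Int → Nat × List Int
  | [] => (0, [])
  | d :: t => if day ≥ d then let r := popWhile day t; (r.1 + 1, r.2) else (0, d :: t)

theorem popWhile_len (day : Int) (ds : List Int) : (popWhile day ds).2.length ≤ ds.length := by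
  induction ds with
  | nil => simp [popWhile]
  | cons d t ih => by_cases h : day ≥ d <;> simp [popWhile, h]; omega

-- A's outer 'while len(days) > 0' loop over the days list
def groupA : List Int → List Int
  | [] => []
  | day :: rest =>
    if rest.isEmpty then [1]
    else
      (((popWhile day rest).1 : Int) + 1) :: groupA (popWhile day rest).2
termination_by l => l.length
decreasing_by
  have := popWhile_len day rest; simp; omega

def solution (progresses : List Int) (speeds : List Int) : List Int :=
  -- for i in range(len(progresses)): days.insert(i, count)  (insert at end = append);
  -- indices i are always in range for progresses, so getD is exact; speeds[i] is only
  -- read by the Python when progresses[i] < 100, where Pre_ guarantees i < len(speeds).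
  let days := (List.range progresses.length).foldl
    (fun acc i => acc ++ [simCount 0 (progresses.getD i 0) (speeds.getD i 0)]) []
  groupA days

-- ===== PORT B =====
def daysClosed (progresses : List Int) (speeds : List Int) : List Int :=
  (List.range progresses.length).map (fun i =>
    let p := progresses.getD i 0
    if 100 ≤ p then 0 else -(PySem.Int.floordiv (p - 100) (speeds.getD i 0)))

-- 'while j < n and days[j] <= t: j += 1' — number of leading days ≤ t
def scanLe (t : Int) : List Int → Nat
  | [] => 0
  | d :: r => if d ≤ t then scanLe t r + 1 else 0

-- 'while i < n' outer loop, advancing i to j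
def groupB : List Int → List Int
  | [] => []
  | t :: rest => ((scanLe t rest : Int) + 1) :: groupB (rest.drop (scanLe t rest))
termination_by l => l.length
decreasing_by simp

def solution_alt (progresses : List Int) (speeds : List Int) : List Int :=
  groupB (daysClosed progresses speeds)

-- ===== PRECONDITION & SPEC =====
-- Pre_ excludes exactly the inputs on which Python A does not return: when some progresses[i] < 100
-- has i ≥ len(speeds) (IndexError) or speeds[i] ≤ 0 (the inner while loop never terminates).
def Pre_solution (progresses : List Int) (speeds : List Int) : Prop :=
  ∀ i ∈ List.range progresses.length,
    100 ≤ progresses.getD i 0 ∨ (i < speeds.length ∧ 0 < speeds.getD i 0)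
instance (progresses : List Int) (speeds : List Int) : Decidable (Pre_solution progresses speeds) := by unfold Pre_solution; infer_instance

def pvWitness_solution : List Int × List Int := ([30, 30, 95], [30, 1, 1])

def Spec_solution (progresses : List Int) (speeds : List Int) (out : List Int) : Prop := out = solution_alt progresses speeds
instance (progresses : List Int) (speeds : List Int) (out : List Int) : Decidable (Spec_solution progresses speeds out) := by unfold Spec_solution; infer_instance

-- ===== CLAIM (what is proved, stated in full; the proofs are below) =====
def Claim_equal_solution : Prop := ∀ (progresses : List Int) (speeds : List Int), Dom_solution progresses speeds → Pre_solution progresses speeds → Spec_solution progresses speeds (solution progresses speeds)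

-- ===== LEMMAS AND PROOFS =====

-- A's counting loop equals the closed-form ceiling division (for a positive speed)
theorem sim_eq (s : Int) (hs : 0 < s) :
    ∀ n (c p : Int), (100 - p).toNat = n → p < 100 →
      simCount c p s = c - PySem.Int.floordiv (p - 100) s := by
  intro n
  induction n using Nat.strong_induction_on with
  | _ n ih =>
    intro c p hn hp
    rw [simCount, dif_pos hp, dif_pos hs]
    by_cases hq : p + s < 100
    · have hrec : simCount (c + 1) (p + s) s = (c + 1) - PySem.Int.floordiv (p + s - 100) s :=
        ih (100 - (p + s)).toNat (by omega) (c + 1) (p + s) rfl hq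
      rw [hrec]
      have hb := (PySem.Int.floordiv_eq_iff_of_pos hs
        (a := p + s - 100) (q := PySem.Int.floordiv (p + s - 100) s)).mp rfl
      have : PySem.Int.floordiv (p - 100) s = PySem.Int.floordiv (p + s - 100) s - 1 := by
        rw [PySem.Int.floordiv_eq_iff_of_pos hs]
        constructor <;> nlinarith [hb.1, hb.2]
      rw [this]; ring
    · have hz : simCount (c + 1) (p + s) s = c + 1 := by
        rw [simCount, dif_neg (by omega)]
      rw [hz]
      have : PySem.Int.floordiv (p - 100) s = -1 := by
        rw [PySem.Int.floordiv_eq_iff_of_pos hs]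
        constructor <;> nlinarith
      rw [this]; ring

theorem sim_eq_ge (c p s : Int) (hp : 100 ≤ p) : simCount c p s = c := by
  rw [simCount, dif_neg (by omega)]

-- A's append-fold builds the same list as a map over the range
theorem foldl_append_map {α β : Type} (f : α → β) :
    ∀ (l : List α) (acc : List β),
      l.foldl (fun acc i => acc ++ [f i]) acc = acc ++ l.map f := by
  intro l
  induction l with
  | nil => simp
  | cons x t ih => intro acc; simp [List.foldl, ih]

theorem popWhile_eq (day : Int) (ds : List Int) :
    popWhile day ds = (scanLe day ds, ds.drop (scanLe day ds)) := by
  induction ds with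
  | nil => simp [popWhile, scanLe]
  | cons d t ih =>
    by_cases h : d ≤ day
    · simp [popWhile, scanLe, ge_iff_le, h, ih]
    · simp [popWhile, scanLe, ge_iff_le, h]

theorem group_eq : ∀ n (ds : List Int), ds.length = n → groupA ds = groupB ds := by
  intro n
  induction n using Nat.strong_induction_on with
  | _ n ih =>
    intro ds hn
    match ds with
    | [] => simp [groupA, groupB]
    | day :: rest =>
      rw [groupA, groupB, popWhile_eq]
      by_cases hr : rest.isEmpty
      · have : rest = [] := List.isEmpty_iff.mp hr
        subst this
        simp [scanLe, groupB]
      · rw [if_neg hr]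
        have hn' : rest.length + 1 = n := by simpa using hn
        have hlen : (rest.drop (scanLe day rest)).length < n := by
          simp only [List.length_drop]
          omega
        rw [ih _ hlen _ rfl]

-- the two day lists coincide under Pre_
theorem days_eq (progresses speeds : List Int) (hpre : Pre_solution progresses speeds) :
    (List.range progresses.length).map
        (fun i => simCount 0 (progresses.getD i 0) (speeds.getD i 0))
      = daysClosed progresses speeds := by
  unfold daysClosed
  apply List.map_congr_left
  intro i hi
  have h := hpre i hi
  by_cases hp : 100 ≤ progresses.getD i 0
  · rw [if_pos hp, sim_eq_ge _ _ _ hp]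
  · rcases h with h | ⟨_, hs⟩
    · exact absurd h hp
    · rw [if_neg hp, sim_eq _ hs _ 0 _ rfl (by omega)]
      ring

-- ===== VERDICT (by name: the statement is the Claim_ definition above) =====
theorem solution_spec : Claim_equal_solution := by
  intro progresses speeds _ hpre
  unfold Spec_solution solution solution_alt
  rw [foldl_append_map]
  simp only [List.nil_append]
  rw [days_eq progresses speeds hpre]
  exact group_eq _ _ rfl
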